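-- pv_equiv track=rewrite | github.com/Chrystalkey/ltzf-collector | collector/scrapers/bt_scraper.py | _get_vorgangstyp
-- ===== SOURCE A (Python) =====
-- from typing import List, Dict, Any, Optional
--
-- def _get_vorgangstyp(vorgang: Dict) -> str:
--     """Erkennung Zustimmung/Einspruchsgesetz"""
--     zustimmungen = vorgang.get("zustimmungsbeduerftigkeit", [])
--
--     if not zustimmungen:
--         return "sonstig"
--
--     gefundene_typen = set()
--
--     for item in zustimmungen:
--         if item.startswith("Nein"):
--             gefundene_typen.add("gg-einspruch")
--         elif item.startswith("Ja"):
--             gefundene_typen.add("gg-zustimmung")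
--
--     # Wenn mehrere unterschiedliche Typen gefunden wurden oder kein Typ erkannt wurde
--     if len(gefundene_typen) != 1:
--         return "sonstig"
--
--     # Ansonsten den einzigen gefundenen Typ zurückgeben
--     return gefundene_typen.pop()
-- ===== SOURCE B (Python) =====
-- def _get_vorgangstyp(vorgang):
--     """Erkennung Zustimmung/Einspruchsgesetz (two independent any-scans)"""
--     zustimmungen = vorgang.get("zustimmungsbeduerftigkeit", [])
--     has_nein = any(i.startswith("Nein") for i in zustimmungen)
--     has_ja = any(i.startswith("Ja") for i in zustimmungen)
--     if has_nein and not has_ja: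
--         return "gg-einspruch"
--     if has_ja and not has_nein:
--         return "gg-zustimmung"
--     return "sonstig"
-- ===== Notes on version B (the rewrite author's own statement) =====
-- stated objective: idiomatic
-- what changed: Replaces the set-accumulator loop plus size check with two independent any() scans for 'Nein'/'Ja' prefixes and a plain boolean branch.
import Mathlib
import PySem

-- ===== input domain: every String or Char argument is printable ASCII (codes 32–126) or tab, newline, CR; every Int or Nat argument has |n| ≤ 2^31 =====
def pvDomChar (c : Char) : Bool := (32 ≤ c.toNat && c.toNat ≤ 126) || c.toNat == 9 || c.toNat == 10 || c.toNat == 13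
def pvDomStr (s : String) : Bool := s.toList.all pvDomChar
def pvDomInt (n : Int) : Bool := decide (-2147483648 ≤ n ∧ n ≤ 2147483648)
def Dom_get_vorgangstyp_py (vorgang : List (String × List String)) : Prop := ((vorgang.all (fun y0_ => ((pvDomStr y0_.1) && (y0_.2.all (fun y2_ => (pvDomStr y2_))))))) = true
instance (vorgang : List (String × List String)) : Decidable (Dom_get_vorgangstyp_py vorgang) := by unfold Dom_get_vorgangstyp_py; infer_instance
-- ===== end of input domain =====

-- B replaces A's set-accumulator loop + size check by two independent any()-scans and a boolean branch (idiomatic; same cost).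

-- ===== PORT A =====
-- A's 'gefundene_typen.pop()' is only reached when the set has exactly one element, where pop() is
-- deterministic: ported as headD "" under the length-1 guard.
def get_vorgangstyp_py (vorgang : List (String × List String)) : String :=
  let zustimmungen := (PySem.Dict.getD (PySem.Dict.mk vorgang) "zustimmungsbeduerftigkeit" [])
  if zustimmungen.isEmpty then "sonstig"
  else
    let gefundene_typen : PySem.Set String :=
      zustimmungen.foldl (fun s item =>
        if PySem.Str.startswith item "Nein" then PySem.Set.add s "gg-einspruch"
        else if PySem.Str.startswith item "Ja" then PySem.Set.add s "gg-zustimmung"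
        else s) PySem.Set.empty
    if gefundene_typen.length ≠ 1 then "sonstig"
    else gefundene_typen.headD ""

-- ===== PORT B =====
def get_vorgangstyp_py_alt (vorgang : List (String × List String)) : String :=
  let zustimmungen := (PySem.Dict.getD (PySem.Dict.mk vorgang) "zustimmungsbeduerftigkeit" [])
  let has_nein := zustimmungen.any (fun i => PySem.Str.startswith i "Nein")
  let has_ja := zustimmungen.any (fun i => PySem.Str.startswith i "Ja")
  if has_nein && !has_ja then "gg-einspruch"
  else if has_ja && !has_nein then "gg-zustimmung"
  else "sonstig"

-- ===== PRECONDITION & SPEC =====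
def Spec_get_vorgangstyp_py (vorgang : List (String × List String)) (out : String) : Prop := out = get_vorgangstyp_py_alt vorgang
instance (vorgang : List (String × List String)) (out : String) : Decidable (Spec_get_vorgangstyp_py vorgang out) := by unfold Spec_get_vorgangstyp_py; infer_instance

-- ===== CLAIM (what is proved, stated in full; the proofs are below) =====
def Claim_equal_get_vorgangstyp_py : Prop := ∀ (vorgang : List (String × List String)), Dom_get_vorgangstyp_py vorgang → Spec_get_vorgangstyp_py vorgang (get_vorgangstyp_py vorgang)

-- ===== LEMMAS AND PROOFS =====

-- One fold step of A's loop, named for the invariant lemma.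
def pvStep (s : PySem.Set String) (item : String) : PySem.Set String :=
  if PySem.Str.startswith item "Nein" then PySem.Set.add s "gg-einspruch"
  else if PySem.Str.startswith item "Ja" then PySem.Set.add s "gg-zustimmung"
  else s

-- Invariant of A's loop: membership of the two tags tracks the two any-scans, all elements are
-- one of the two tags (or initial), and the accumulator stays duplicate-free.
theorem pvNeinJa (z : List Char) (hn : PySem.Chars.startswith z ['N','e','i','n'] = true) :
    PySem.Chars.startswith z ['J','a'] = false := by
  rcases (PySem.Chars.startswith_iff _ _).mp hn with ⟨t, ht⟩
  by_contra h
  rw [Bool.not_eq_false] at h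
  rcases (PySem.Chars.startswith_iff _ _).mp h with ⟨t', ht'⟩
  rw [← ht] at ht'
  simp at ht'

theorem pvFold_inv (zs : List String) (s : PySem.Set String) (hnd : s.Nodup) :
    ("gg-einspruch" ∈ zs.foldl pvStep s ↔ "gg-einspruch" ∈ s ∨ zs.any (fun i => PySem.Str.startswith i "Nein") = true) ∧
    ("gg-zustimmung" ∈ zs.foldl pvStep s ↔ "gg-zustimmung" ∈ s ∨ zs.any (fun i => PySem.Str.startswith i "Ja") = true) ∧
    (∀ x ∈ zs.foldl pvStep s, x = "gg-einspruch" ∨ x = "gg-zustimmung" ∨ x ∈ s) ∧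
    (zs.foldl pvStep s).Nodup := by
  induction zs generalizing s with
  | nil => exact ⟨by simp, by simp, fun x hx => Or.inr (Or.inr hx), hnd⟩
  | cons z zs ih =>
    have hstep : (pvStep s z).Nodup := by
      unfold pvStep; split_ifs <;> first | exact PySem.Set.nodup_add _ _ hnd | exact hnd
    obtain ⟨h1, h2, h3, h4⟩ := ih (pvStep s z) hstep
    refine ⟨?_, ?_, ?_, ?_⟩
    · rw [List.foldl_cons, h1]
      unfold pvStep
      by_cases hn : PySem.Str.startswith z "Nein" = true
      · simp at hn; simp [hn, PySem.Set.mem_add]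
      · by_cases hj : PySem.Str.startswith z "Ja" = true
        · simp at hn hj
          simp [hn, hj, PySem.Set.mem_add]
        · simp at hn hj; simp [hn, hj]
    · rw [List.foldl_cons, h2]
      unfold pvStep
      by_cases hn : PySem.Str.startswith z "Nein" = true
      · simp at hn
        have hj := pvNeinJa _ hn
        simp [hn, hj, PySem.Set.mem_add]
      · by_cases hj : PySem.Str.startswith z "Ja" = true
        · simp at hn hj; simp [hn, hj, PySem.Set.mem_add]
        · simp at hn hj; simp [hn, hj]
    · intro x hx
      rcases h3 x hx with h | h | h
      · tauto
      · tauto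
      · unfold pvStep at h
        split_ifs at h <;> first
          | (simp [PySem.Set.mem_add] at h; tauto)
          | tauto
    · exact h4

-- ===== VERDICT (by name: the statement is the Claim_ definition above) =====
-- a duplicate-free list whose elements all equal a, containing a, is [a]
theorem pvSingleton (r : List String) (a : String) (h1 : a ∈ r)
    (h2 : ∀ x ∈ r, x = a) (h3 : r.Nodup) : r = [a] := by
  match r with
  | [] => cases h1
  | [x] => simp [h2 x (by simp)]
  | x :: y :: t =>
    have hx := h2 x (by simp)
    have hy := h2 y (by simp)
    subst hx; subst hy
    simp at h3

theorem get_vorgangstyp_py_spec : Claim_equal_get_vorgangstyp_py := by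
  intro v _hd
  unfold Spec_get_vorgangstyp_py get_vorgangstyp_py get_vorgangstyp_py_alt
  set zs := PySem.Dict.getD (PySem.Dict.mk v) "zustimmungsbeduerftigkeit" [] with hzs
  by_cases hemp : zs.isEmpty
  · have : zs = [] := by simpa [List.isEmpty_iff] using hemp
    simp [this]
  · simp only [hemp]
    have hfold : (fun (s : PySem.Set String) (item : String) =>
        if PySem.Str.startswith item "Nein" then PySem.Set.add s "gg-einspruch"
        else if PySem.Str.startswith item "Ja" then PySem.Set.add s "gg-zustimmung"
        else s) = pvStep := rfl
    rw [hfold]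
    obtain ⟨h1, h2, h3, h4⟩ := pvFold_inv zs PySem.Set.empty (by simp [PySem.Set.empty])
    set r := zs.foldl pvStep PySem.Set.empty with hr
    by_cases hn : zs.any (fun i => PySem.Str.startswith i "Nein") = true
    · by_cases hj : zs.any (fun i => PySem.Str.startswith i "Ja") = true
      · -- both found: set has two distinct members, length ≠ 1 → sonstig on both sides
        have hE : "gg-einspruch" ∈ r := h1.mpr (Or.inr hn)
        have hZ : "gg-zustimmung" ∈ r := h2.mpr (Or.inr hj)
        have hlen : r.length ≠ 1 := by
          intro hl
          match r, hl with
          | [x], _ =>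
            simp at hE hZ
            rw [← hE] at hZ
            exact absurd hZ (by decide)
        have hn' := hn; have hj' := hj
        simp only [hn', hj']
        simp [hlen]
      · -- only Nein: the set is exactly ["gg-einspruch"]
        have hZ : "gg-zustimmung" ∉ r := by
          intro h
          rcases h2.mp h with h | h
          · simp [PySem.Set.empty] at h
          · exact hj h
        have hall : ∀ x ∈ r, x = "gg-einspruch" := by
          intro x hx
          rcases h3 x hx with h | h | h
          · exact h
          · exact absurd (h ▸ hx) hZ
          · simp [PySem.Set.empty] at h
        have : r = ["gg-einspruch"] := pvSingleton r _ (h1.mpr (Or.inr hn)) hall h4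
        have hj' : (zs.any fun i => PySem.Str.startswith i "Ja") = false := by
          simpa using hj
        simp only [hn, hj']
        simp [this]
    · by_cases hj : zs.any (fun i => PySem.Str.startswith i "Ja") = true
      · -- only Ja: the set is exactly ["gg-zustimmung"]
        have hE : "gg-einspruch" ∉ r := by
          intro h
          rcases h1.mp h with h | h
          · simp [PySem.Set.empty] at h
          · exact hn h
        have hall : ∀ x ∈ r, x = "gg-zustimmung" := by
          intro x hx
          rcases h3 x hx with h | h | h
          · exact absurd (h ▸ hx) hE
          · exact h
          · simp [PySem.Set.empty] at h
        have : r = ["gg-zustimmung"] := pvSingleton r _ (h2.mpr (Or.inr hj)) hall h4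
        have hn' : (zs.any fun i => PySem.Str.startswith i "Nein") = false := by
          simpa using hn
        simp only [hn', hj]
        simp [this]
      · -- neither found: the set is empty, length 0 ≠ 1 → sonstig on both sides
        have : r = [] := by
          match r, h3 with
          | [], _ => rfl
          | x :: t, h3 =>
            rcases h3 x (by simp) with h | h | h
            · exact absurd (h1.mp (h ▸ List.mem_cons_self ..)) (by
                intro hh; rcases hh with hh | hh
                · simp [PySem.Set.empty] at hh
                · exact hn hh)
            · exact absurd (h2.mp (h ▸ List.mem_cons_self ..)) (by
                intro hh; rcases hh with hh | hh
                · simp [PySem.Set.empty] at hh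
                · exact hj hh)
            · simp [PySem.Set.empty] at h
        have hn' : (zs.any fun i => PySem.Str.startswith i "Nein") = false := by
          simpa using hn
        have hj' : (zs.any fun i => PySem.Str.startswith i "Ja") = false := by
          simpa using hj
        simp only [hn', hj']
        simp [this]
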